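-- pv_equiv track=rewrite | github.com/aerospike/aerospike-graph | scale-free-network/ego/generator/generate-multitype-scalefree.py | partition_even
-- ===== SOURCE A (Python) =====
-- def partition_even(total: int, parts: int):
--     """
--     Evenly partition 'total' items into 'parts' (prefix-heavy remainder).
--     Returns a list of (start, count).
--     """
--     base = total // parts
--     rem = total % parts
--     partitions = []
--     start = 0
--     for i in range(parts):
--         cnt = base + (1 if i < rem else 0)
--         partitions.append((start, cnt))
--         start += cnt
--     return partitions
-- ===== SOURCE B (Python) =====
-- def partition_even(total: int, parts: int):
--     """
--     Evenly partition 'total' items into 'parts' (prefix-heavy remainder).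
--     Returns a list of (start, count).
--     """
--     base = total // parts
--     rem = total % parts
--     return [(i * base + min(i, rem), base + (1 if i < rem else 0))
--             for i in range(parts)]
-- ===== Notes on version B (the rewrite author's own statement) =====
-- stated objective: simpler
-- what changed: Replaces the running start accumulator with a per-index closed form start = i*base + min(i, rem), producing each pair independently in a comprehension instead of by prefix summation.
import Mathlib
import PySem

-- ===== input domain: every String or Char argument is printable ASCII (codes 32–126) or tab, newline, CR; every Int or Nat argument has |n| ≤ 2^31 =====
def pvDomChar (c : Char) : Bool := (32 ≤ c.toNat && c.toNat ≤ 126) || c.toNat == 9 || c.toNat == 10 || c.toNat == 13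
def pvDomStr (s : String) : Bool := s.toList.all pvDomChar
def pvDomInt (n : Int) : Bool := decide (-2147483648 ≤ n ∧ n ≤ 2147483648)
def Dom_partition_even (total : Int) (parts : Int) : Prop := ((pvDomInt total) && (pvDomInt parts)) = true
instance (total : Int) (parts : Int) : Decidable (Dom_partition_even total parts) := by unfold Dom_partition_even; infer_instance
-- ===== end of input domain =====

-- B replaces A's running `start` accumulator with a per-index closed form (simpler decomposition, same cost).

-- ===== PORT A =====
def partition_even (total : Int) (parts : Int) : List (Int × Int) :=
  let base := PySem.Int.floordiv total parts
  let rem := PySem.Int.mod total parts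
  let st := (PySem.List.pyRange 0 parts 1).foldl
    (fun (s : List (Int × Int) × Int) i =>
      let cnt := base + (if i < rem then 1 else 0)
      (s.1 ++ [(s.2, cnt)], s.2 + cnt)) ([], 0)
  st.1

-- ===== PORT B =====
def partition_even_alt (total : Int) (parts : Int) : List (Int × Int) :=
  let base := PySem.Int.floordiv total parts
  let rem := PySem.Int.mod total parts
  (PySem.List.pyRange 0 parts 1).map (fun i =>
    (i * base + min i rem, base + (if i < rem then 1 else 0)))

-- ===== PRECONDITION & SPEC =====
-- Pre_ excludes parts = 0, where Python's '//' raises ZeroDivisionError in both A and B.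
def Pre_partition_even (total : Int) (parts : Int) : Prop := parts ≠ 0
instance (total : Int) (parts : Int) : Decidable (Pre_partition_even total parts) := by unfold Pre_partition_even; infer_instance
def pvWitness_partition_even : Int × Int := (7, 3)
def Spec_partition_even (total : Int) (parts : Int) (out : List (Int × Int)) : Prop := out = partition_even_alt total parts
instance (total : Int) (parts : Int) (out : List (Int × Int)) : Decidable (Spec_partition_even total parts out) := by unfold Spec_partition_even; infer_instance

-- ===== CLAIM (what is proved, stated in full; the proofs are below) =====
def Claim_equal_partition_even : Prop := ∀ (total : Int) (parts : Int), Dom_partition_even total parts → Pre_partition_even total parts → Spec_partition_even total parts (partition_even total parts)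

-- ===== LEMMAS AND PROOFS =====

-- loop invariant (0 ≤ rem): after folding i = 0..n-1, the list holds B's closed forms
-- and start = n*base + min n rem
theorem partition_even_fold_inv (base rem : Int) (hrem : 0 ≤ rem) (n : Nat) :
    (List.range n).foldl
      (fun (s : List (Int × Int) × Int) (k : Nat) =>
        (s.1 ++ [(s.2, base + (if (k : Int) < rem then 1 else 0))],
         s.2 + (base + (if (k : Int) < rem then 1 else 0)))) ([], 0)
    = ((List.range n).map (fun (k : Nat) =>
         ((k : Int) * base + min (k : Int) rem, base + (if (k : Int) < rem then 1 else 0))),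
       (n : Int) * base + min (n : Int) rem) := by
  induction n with
  | zero => simp [min_eq_left hrem]
  | succ n ih =>
    rw [List.range_succ, List.foldl_append, ih, List.foldl_cons, List.foldl_nil,
        List.map_append]
    refine Prod.ext rfl ?_
    push_cast
    by_cases h : (n : Int) < rem <;> simp only [h, if_true, if_false, add_mul, one_mul] <;> omega

-- ===== VERDICT (by name: the statement is the Claim_ definition above) =====
theorem partition_even_spec : Claim_equal_partition_even := by
  intro total parts _ _
  unfold Spec_partition_even partition_even partition_even_alt
  rw [PySem.List.pyRange_one]
  simp only [sub_zero, zero_add, List.foldl_map, List.map_map, Function.comp_def]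
  by_cases hp : parts ≤ 0
  · have : parts.toNat = 0 := Int.toNat_of_nonpos hp
    simp [this]
  · have hp : 0 < parts := by omega
    have hrem : 0 ≤ PySem.Int.mod total parts := by
      rw [PySem.Int.mod_eq_emod_of_pos hp]
      exact Int.emod_nonneg total (by omega)
    rw [partition_even_fold_inv _ _ hrem]
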